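-- pv_equiv track=rewrite | github.com/dStensland/LostCity | crawlers/sources/ebenezer_church.py | determine_category_and_tags
-- ===== SOURCE A (Python) =====
-- from typing import Optional
--
-- def determine_category_and_tags(title: str, description: str) -> tuple[str, Optional[str], list[str]]:
--     """Determine category based on title and description."""
--     text = f"{title} {description}".lower()
--     tags = ["ebenezer-baptist", "faith", "sweet-auburn"]
--
--     # Check if it's MLK-related (important historical events)
--     if any(kw in text for kw in ["mlk", "martin luther king", "civil rights"]):
--         tags.extend(["mlk", "civil-rights", "black-history-month"])
--         if "birthday" in text or "celebration" in text:
--             return "community", "celebration", tags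
--
--     # Bible study
--     if "bible study" in text:
--         tags.extend(["bible-study", "education"])
--         return "community", "education", tags
--
--     # Prayer groups
--     if "prayer" in text:
--         tags.extend(["prayer", "spirituality"])
--         return "community", "spiritual", tags
--
--     # Youth/Young Adult events
--     if any(kw in text for kw in ["youth", "young adult", "yam"]):
--         tags.extend(["young-adults", "18-35"])
--         return "community", "youth", tags
--
--     # Music/Concert
--     if any(kw in text for kw in ["concert", "choir", "music", "symphony"]):
--         tags.extend(["music", "live-music"])
--         return "music", "gospel", tags
--
--     # Lecture/Educational
--     if any(kw in text for kw in ["lecture", "symposium", "talk", "discussion"]):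
--         tags.extend(["education", "lecture"])
--         return "community", "education", tags
--
--     # Default to faith/community
--     return "community", "faith", tags
-- ===== SOURCE B (Python) =====
-- # B: priority-minimisation classifier - one pass over a flat keyword->priority map takes the
-- # minimum matched priority, then a single table lookup; no ordered early-return chain.
-- KEYWORDS = [
--     ("bible study", 0),
--     ("prayer", 1),
--     ("youth", 2), ("young adult", 2), ("yam", 2),
--     ("concert", 3), ("choir", 3), ("music", 3), ("symphony", 3),
--     ("lecture", 4), ("symposium", 4), ("talk", 4), ("discussion", 4),
-- ]
-- OUTCOMES = [
--     (["bible-study", "education"], "community", "education"),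
--     (["prayer", "spirituality"], "community", "spiritual"),
--     (["young-adults", "18-35"], "community", "youth"),
--     (["music", "live-music"], "music", "gospel"),
--     (["education", "lecture"], "community", "education"),
--     ([], "community", "faith"),
-- ]
--
-- def determine_category_and_tags(title, description):
--     text = (title + " " + description).lower()
--     tags = ["ebenezer-baptist", "faith", "sweet-auburn"]
--     if any(kw in text for kw in ("mlk", "martin luther king", "civil rights")):
--         tags = tags + ["mlk", "civil-rights", "black-history-month"]
--         if "birthday" in text or "celebration" in text:
--             return "community", "celebration", tags
--     best = 5
--     for kw, rid in KEYWORDS: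
--         if rid < best and kw in text:
--             best = rid
--     extra, cat, sub = OUTCOMES[best]
--     return cat, sub, tags + extra
-- ===== Notes on version B (the rewrite author's own statement) =====
-- stated objective: alternative
-- what changed: Replaces A's ordered early-return if/elif chain with a flat keyword-to-priority map scanned in one pass to take the minimum matched priority, followed by a single outcome-table lookup (MLK special case kept up front).
import Mathlib
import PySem

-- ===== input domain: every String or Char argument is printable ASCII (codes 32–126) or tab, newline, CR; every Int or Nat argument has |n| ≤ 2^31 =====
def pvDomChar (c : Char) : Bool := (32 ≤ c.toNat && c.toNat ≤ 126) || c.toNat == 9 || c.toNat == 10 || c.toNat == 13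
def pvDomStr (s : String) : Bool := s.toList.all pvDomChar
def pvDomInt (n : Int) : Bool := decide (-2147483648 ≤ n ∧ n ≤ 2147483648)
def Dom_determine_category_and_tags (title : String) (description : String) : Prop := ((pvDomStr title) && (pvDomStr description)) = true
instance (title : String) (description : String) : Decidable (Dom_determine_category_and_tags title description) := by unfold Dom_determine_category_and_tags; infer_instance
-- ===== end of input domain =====

-- B replaces A's ordered early-return keyword chain (after the shared MLK special case) with a
-- one-pass minimum over a flat keyword→priority map plus a single outcome-table lookup; return
-- value only, same cost.

-- ===== PORT A =====
-- any(kw in text for kw in kws)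
def pvAnyIn (kws : List (List Char)) (text : List Char) : Bool :=
  kws.any (fun kw => PySem.Chars.isIn kw text)

-- A's if-chain after the MLK block (the code both MLK branches fall through to)
def pvRestA (text : List Char) (tags : List String) : String × Option String × List String :=
  if PySem.Chars.isIn "bible study".toList text then
    ("community", some "education", tags ++ ["bible-study", "education"])
  else if PySem.Chars.isIn "prayer".toList text then
    ("community", some "spiritual", tags ++ ["prayer", "spirituality"])
  else if pvAnyIn ["youth".toList, "young adult".toList, "yam".toList] text then
    ("community", some "youth", tags ++ ["young-adults", "18-35"])
  else if pvAnyIn ["concert".toList, "choir".toList, "music".toList, "symphony".toList] text then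
    ("music", some "gospel", tags ++ ["music", "live-music"])
  else if pvAnyIn ["lecture".toList, "symposium".toList, "talk".toList, "discussion".toList] text then
    ("community", some "education", tags ++ ["education", "lecture"])
  else ("community", some "faith", tags)

def determine_category_and_tags (title : String) (description : String) : String × Option String × List String :=
  let text := PySem.Chars.lower (title.toList ++ ' ' :: description.toList)
  let tags := ["ebenezer-baptist", "faith", "sweet-auburn"]
  if pvAnyIn ["mlk".toList, "martin luther king".toList, "civil rights".toList] text then
    let tags := tags ++ ["mlk", "civil-rights", "black-history-month"]
    if PySem.Chars.isIn "birthday".toList text || PySem.Chars.isIn "celebration".toList text then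
      ("community", some "celebration", tags)
    else pvRestA text tags
  else pvRestA text tags

-- ===== PORT B =====
-- Source B's module-level KEYWORDS (flat keyword → priority map) and OUTCOMES tables
def pvKeywords : List (List Char × Nat) :=
  [("bible study".toList, 0),
   ("prayer".toList, 1),
   ("youth".toList, 2), ("young adult".toList, 2), ("yam".toList, 2),
   ("concert".toList, 3), ("choir".toList, 3), ("music".toList, 3), ("symphony".toList, 3),
   ("lecture".toList, 4), ("symposium".toList, 4), ("talk".toList, 4), ("discussion".toList, 4)]

def pvOutcomes : List (List String × String × String) :=
  [(["bible-study", "education"], "community", "education"),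
   (["prayer", "spirituality"], "community", "spiritual"),
   (["young-adults", "18-35"], "community", "youth"),
   (["music", "live-music"], "music", "gospel"),
   (["education", "lecture"], "community", "education"),
   ([], "community", "faith")]

-- Source B's 'for kw, rid in KEYWORDS' loop keeping the minimum matched priority
def pvBest (text : List Char) : Nat :=
  pvKeywords.foldl
    (fun best p => if decide (p.2 < best) && PySem.Chars.isIn p.1 text then p.2 else best) 5

-- Source B's tail: OUTCOMES[best] (best ≤ 5 always, so the getD default is never used) then the return
def pvCore (text : List Char) (tags : List String) : String × Option String × List String :=
  match pvOutcomes.getD (pvBest text) ([], "community", "faith") with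
  | (extra, cat, sub) => (cat, some sub, tags ++ extra)

def determine_category_and_tags_alt (title : String) (description : String) : String × Option String × List String :=
  let text := PySem.Chars.lower (title.toList ++ ' ' :: description.toList)
  let tags := ["ebenezer-baptist", "faith", "sweet-auburn"]
  if ["mlk".toList, "martin luther king".toList, "civil rights".toList].any
      (fun kw => PySem.Chars.isIn kw text) then
    let tags := tags ++ ["mlk", "civil-rights", "black-history-month"]
    if PySem.Chars.isIn "birthday".toList text || PySem.Chars.isIn "celebration".toList text then
      ("community", some "celebration", tags)
    else pvCore text tags
  else pvCore text tags

-- ===== PRECONDITION & SPEC =====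
def Spec_determine_category_and_tags (title : String) (description : String) (out : String × Option String × List String) : Prop := out = determine_category_and_tags_alt title description
instance (title : String) (description : String) (out : String × Option String × List String) : Decidable (Spec_determine_category_and_tags title description out) := by unfold Spec_determine_category_and_tags; infer_instance

-- ===== CLAIM =====
def Claim_equal_determine_category_and_tags : Prop := ∀ (title : String) (description : String), Dom_determine_category_and_tags title description → Spec_determine_category_and_tags title description (determine_category_and_tags title description)

-- ===== LEMMAS AND PROOFS =====

-- outcome of a priority index
def pvOutAt (n : Nat) (tags : List String) : String × Option String × List String :=
  match pvOutcomes.getD n ([], "community", "faith") with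
  | (extra, cat, sub) => (cat, some sub, tags ++ extra)

-- A's chain as an index
def pvIdxChain (b0 b1 b2 b3 b4 : Bool) : Nat :=
  if b0 then 0 else if b1 then 1 else if b2 then 2 else if b3 then 3 else if b4 then 4 else 5

-- B's fold step and the fold as an index over abstract match bits
def pvStep (best : Nat) (p : Bool × Nat) : Nat :=
  if decide (p.2 < best) && p.1 then p.2 else best

def pvIdxMin (l : List (Bool × Nat)) : Nat :=
  l.foldl pvStep 5

-- two consecutive entries with the same priority act like their disjunction
theorem pvStep_merge (best : Nat) (b b' : Bool) (r : Nat) :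
    pvStep (pvStep best (b, r)) (b', r) = pvStep best (b || b', r) := by
  cases b <;> cases b' <;> simp [pvStep] <;> split_ifs <;> omega

-- the chain and the five-step minimum fold agree on every match pattern
theorem pvIdx5 : ∀ b0 b1 g2 g3 g4 : Bool,
    pvIdxChain b0 b1 g2 g3 g4
      = pvStep (pvStep (pvStep (pvStep (pvStep 5 (b0, 0)) (b1, 1)) (g2, 2)) (g3, 3)) (g4, 4) := by
  decide

theorem pvIdx_eq : ∀ b0 b1 b2 b3 b4 b5 b6 b7 b8 b9 b10 b11 b12 : Bool,
    pvIdxChain b0 b1 (b2 || b3 || b4) (b5 || b6 || b7 || b8) (b9 || b10 || b11 || b12)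
      = pvIdxMin [(b0, 0), (b1, 1), (b2, 2), (b3, 2), (b4, 2), (b5, 3), (b6, 3), (b7, 3), (b8, 3),
                  (b9, 4), (b10, 4), (b11, 4), (b12, 4)] := by
  intro b0 b1 b2 b3 b4 b5 b6 b7 b8 b9 b10 b11 b12
  simp only [pvIdxMin, List.foldl]
  simp only [pvStep_merge]
  exact pvIdx5 b0 b1 (b2 || b3 || b4) (b5 || b6 || b7 || b8) (b9 || b10 || b11 || b12)

theorem pvRestA_eq_out (text : List Char) (tags : List String) :
    pvRestA text tags
      = pvOutAt (pvIdxChain (PySem.Chars.isIn "bible study".toList text)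
          (PySem.Chars.isIn "prayer".toList text)
          (pvAnyIn ["youth".toList, "young adult".toList, "yam".toList] text)
          (pvAnyIn ["concert".toList, "choir".toList, "music".toList, "symphony".toList] text)
          (pvAnyIn ["lecture".toList, "symposium".toList, "talk".toList, "discussion".toList] text))
          tags := by
  simp only [pvRestA, pvIdxChain, pvOutAt]
  split_ifs <;> simp [pvOutcomes]

-- B's keyword fold depends on each keyword only through its match bit
theorem pvFoldMap (text : List Char) (l : List (List Char × Nat)) (init : Nat) :
    l.foldl (fun best p => if decide (p.2 < best) && PySem.Chars.isIn p.1 text then p.2 else best) init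
      = (l.map (fun p => (PySem.Chars.isIn p.1 text, p.2))).foldl pvStep init := by
  induction l generalizing init with
  | nil => rfl
  | cons h t ih => simp only [List.foldl, List.map, pvStep]; exact ih _

theorem pvBest_eq_idx (text : List Char) :
    pvBest text
      = pvIdxMin [(PySem.Chars.isIn "bible study".toList text, 0),
          (PySem.Chars.isIn "prayer".toList text, 1),
          (PySem.Chars.isIn "youth".toList text, 2), (PySem.Chars.isIn "young adult".toList text, 2),
          (PySem.Chars.isIn "yam".toList text, 2),
          (PySem.Chars.isIn "concert".toList text, 3), (PySem.Chars.isIn "choir".toList text, 3),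
          (PySem.Chars.isIn "music".toList text, 3), (PySem.Chars.isIn "symphony".toList text, 3),
          (PySem.Chars.isIn "lecture".toList text, 4), (PySem.Chars.isIn "symposium".toList text, 4),
          (PySem.Chars.isIn "talk".toList text, 4), (PySem.Chars.isIn "discussion".toList text, 4)] := by
  simp only [pvBest, pvFoldMap, pvKeywords, List.map, pvIdxMin]

theorem pvCore_out (text : List Char) (tags : List String) :
    pvCore text tags = pvOutAt (pvBest text) tags := by
  unfold pvCore pvOutAt
  generalize pvOutcomes.getD (pvBest text) ([], "community", "faith") = r
  rcases r with ⟨e, c, sub⟩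
  rfl

theorem pvRestA_eq_core (text : List Char) (tags : List String) :
    pvRestA text tags = pvCore text tags := by
  rw [pvRestA_eq_out, pvCore_out, pvBest_eq_idx, ← pvIdx_eq]
  congr 2 <;>
    simp only [pvAnyIn, List.any_cons, List.any_nil, Bool.or_false, Bool.or_assoc]

-- ===== VERDICT =====
theorem determine_category_and_tags_spec : Claim_equal_determine_category_and_tags := by
  intro title description _
  unfold Spec_determine_category_and_tags determine_category_and_tags determine_category_and_tags_alt pvAnyIn
  simp only [pvRestA_eq_core]
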